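-- pv_equiv track=rewrite | github.com/yoshiinet/dcase2021_task2_ar_frame_seq_model | _03_collect_results.py | matchine_types
-- ===== SOURCE A (Python) =====
-- def matchine_types(csv_files):
--     """
--     return machine_type, selected_files
--     """
--     selected_files = []
--     prev_machine_type = None
--     for x in csv_files:
--         basename = x[1] # get base
--         machine_type = basename.split('_')[2] # machine_type
--         if machine_type != prev_machine_type:
--             if selected_files:
--                 yield prev_machine_type, selected_files
--                 selected_files = []
--
--         selected_files += [x]
--         prev_machine_type = machine_type
--
--     if selected_files:
--         yield prev_machine_type, selected_files
-- ===== SOURCE B (Python) =====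
-- def matchine_types(csv_files):
--     """
--     return machine_type, selected_files
--     """
--     n = len(csv_files)
--     i = 0
--     while i < n:
--         machine_type = csv_files[i][1].split('_')[2]
--         j = i + 1
--         while j < n and csv_files[j][1].split('_')[2] == machine_type:
--             j += 1
--         yield machine_type, csv_files[i:j]
--         i = j
-- ===== Notes on version B (the rewrite author's own statement) =====
-- stated objective: alternative
-- what changed: Replaces the prev-key sentinel plus mutable accumulator fold with a two-pointer span scan: an index advances past each maximal run of equal keys and the group is emitted as one slice.
import Mathlib
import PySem

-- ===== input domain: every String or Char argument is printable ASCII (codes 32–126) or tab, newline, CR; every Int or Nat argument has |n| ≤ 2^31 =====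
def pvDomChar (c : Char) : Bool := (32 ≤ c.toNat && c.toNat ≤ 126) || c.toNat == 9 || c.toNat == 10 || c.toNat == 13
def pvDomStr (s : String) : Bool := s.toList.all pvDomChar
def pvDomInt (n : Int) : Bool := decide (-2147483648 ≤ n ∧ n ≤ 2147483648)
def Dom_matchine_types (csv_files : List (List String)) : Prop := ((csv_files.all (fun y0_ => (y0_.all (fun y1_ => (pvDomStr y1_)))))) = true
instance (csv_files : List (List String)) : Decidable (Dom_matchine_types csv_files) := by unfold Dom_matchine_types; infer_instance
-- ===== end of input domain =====

-- B replaces A's prev-key/accumulator fold with a two-pointer span scan over indices; A is a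
-- generator and B yields the same sequence (the ports compare the materialised lists).

-- ===== PORT A =====
-- machine_type of a row: x[1].split('_')[2]; the defaults are unreachable under Pre_.
def pvKey (x : List String) : String :=
  PySem.List.pyGetD ((PySem.Str.split? (PySem.List.pyGetD x 1 "") "_").getD []) 2 ""

-- one loop iteration of A: state = (yielded so far, selected_files, prev_machine_type)
def pvAStep (st : List (String × List (List String)) × List (List String) × Option String)
    (x : List String) : List (String × List (List String)) × List (List String) × Option String :=
  let machine_type := pvKey x
  let st' :=
    if some machine_type ≠ st.2.2 then
      if st.2.1 ≠ [] then (st.1 ++ [(st.2.2.getD "", st.2.1)], ([] : List (List String)))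
      else (st.1, st.2.1)
    else (st.1, st.2.1)
  (st'.1, st'.2 ++ [x], some machine_type)

def matchine_types (csv_files : List (List String)) : List (String × List (List String)) :=
  let st := csv_files.foldl pvAStep ([], [], none)
  if st.2.1 ≠ [] then st.1 ++ [(st.2.2.getD "", st.2.1)] else st.1

-- ===== PORT B =====
def pvSameKey (key : String) (y : List String) : Bool := pvKey y == key

-- inner while loop: advance j past the run of rows with the same machine_type
def pvScan (csv : List (List String)) (n : Nat) (key : String) (j : Nat) : Nat :=
  if j < n ∧ pvSameKey key (PySem.List.pyGetD csv (j : Int) []) then pvScan csv n key (j + 1)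
  else j
termination_by n - j
decreasing_by omega

theorem pvScan_ge (csv : List (List String)) (n : Nat) (key : String) (j : Nat) :
    j ≤ pvScan csv n key j := by
  unfold pvScan
  split
  · exact le_trans (by omega) (pvScan_ge csv n key (j + 1))
  · exact le_refl j
termination_by n - j
decreasing_by rename_i h; omega

-- outer while loop over the start index i; each group is the slice csv_files[i:j]
def pvAltGo (csv : List (List String)) (n : Nat) (i : Nat) :
    List (String × List (List String)) :=
  if h : i < n then
    let machine_type := pvKey (PySem.List.pyGetD csv (i : Int) [])
    let j := pvScan csv n machine_type (i + 1)
    (machine_type, PySem.List.slice csv (some (i : Int)) (some (j : Int))) :: pvAltGo csv n j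
  else []
termination_by n - i
decreasing_by have := pvScan_ge csv n (pvKey (PySem.List.pyGetD csv (i : Int) [])) (i + 1); omega

def matchine_types_alt (csv_files : List (List String)) : List (String × List (List String)) :=
  pvAltGo csv_files csv_files.length 0

-- ===== PRECONDITION & SPEC =====
-- Pre_ excludes exactly the inputs on which the Python A raises IndexError: a row with fewer
-- than 2 fields (x[1]) or whose basename splits into fewer than 3 '_'-parts (split('_')[2]).
def Pre_matchine_types (csv_files : List (List String)) : Prop :=
  ∀ x ∈ csv_files, 2 ≤ x.length ∧ 3 ≤ ((PySem.Str.split? (x.getD 1 "") "_").getD []).length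
instance (csv_files : List (List String)) : Decidable (Pre_matchine_types csv_files) := by
  unfold Pre_matchine_types; infer_instance

def pvWitness_matchine_types : List (List String) :=
  [["0.csv", "anomaly_id_fan_01.csv"], ["1.csv", "anomaly_id_pump_02.csv"]]

def Spec_matchine_types (csv_files : List (List String)) (out : List (String × List (List String))) : Prop := out = matchine_types_alt csv_files
instance (csv_files : List (List String)) (out : List (String × List (List String))) : Decidable (Spec_matchine_types csv_files out) := by unfold Spec_matchine_types; infer_instance

-- ===== CLAIM (what is proved, stated in full; the proofs are below) =====
def Claim_equal_matchine_types : Prop := ∀ (csv_files : List (List String)), Dom_matchine_types csv_files → Pre_matchine_types csv_files → Spec_matchine_types csv_files (matchine_types csv_files)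

-- ===== LEMMAS AND PROOFS =====

-- grouping by maximal runs, expressed structurally (proof-only reference form)
def pvBgo : List (List String) → List (String × List (List String))
  | [] => []
  | x :: xs =>
    (pvKey x, x :: xs.takeWhile (pvSameKey (pvKey x))) :: pvBgo (xs.dropWhile (pvSameKey (pvKey x)))
termination_by l => l.length
decreasing_by simpa using Nat.lt_succ_of_le (List.Sublist.length_le (List.dropWhile_sublist _))

theorem pvBgo_nil : pvBgo [] = [] := pvBgo.eq_1

theorem pvBgo_cons (x : List String) (xs : List (List String)) :
    pvBgo (x :: xs) =
      (pvKey x, x :: xs.takeWhile (pvSameKey (pvKey x))) ::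
        pvBgo (xs.dropWhile (pvSameKey (pvKey x))) := pvBgo.eq_2 x xs

theorem pvTakeLen (p : List String → Bool) (l : List (List String)) :
    l.take (l.takeWhile p).length = l.takeWhile p := by
  induction l with
  | nil => rfl
  | cons x xs ih => rw [List.takeWhile_cons]; by_cases h : p x <;> simp [h, ih]

theorem pvDropLen (p : List String → Bool) (l : List (List String)) :
    l.drop (l.takeWhile p).length = l.dropWhile p := by
  induction l with
  | nil => rfl
  | cons x xs ih =>
    rw [List.takeWhile_cons, List.dropWhile_cons]; by_cases h : p x <;> simp [h, ih]

theorem pvScan_eq (csv : List (List String)) (key : String) (j : Nat) (hj : j ≤ csv.length) :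
    pvScan csv csv.length key j = j + ((csv.drop j).takeWhile (pvSameKey key)).length := by
  unfold pvScan
  rcases Nat.lt_or_ge j csv.length with h | h
  · have hget : PySem.List.pyGetD csv (j : Int) [] = csv[j] := by
      simp [PySem.List.pyGetD_natCast, List.getD, h]
    have hdrop : csv.drop j = csv[j] :: csv.drop (j + 1) := List.drop_eq_getElem_cons h
    by_cases hk : pvSameKey key csv[j]
    · rw [if_pos ⟨h, by rw [hget]; exact hk⟩, pvScan_eq csv key (j + 1) (by omega)]
      rw [hdrop, List.takeWhile_cons, if_pos hk]
      simp only [List.length_cons]; omega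
    · rw [if_neg (by rw [hget]; exact fun hc => hk hc.2)]
      rw [hdrop, List.takeWhile_cons, if_neg hk]
      simp
  · rw [if_neg (by omega), List.drop_eq_nil_of_le h]
    simp
termination_by csv.length - j
decreasing_by omega

theorem pvAltGo_eq (csv : List (List String)) (i : Nat) (hi : i ≤ csv.length) :
    pvAltGo csv csv.length i = pvBgo (csv.drop i) := by
  unfold pvAltGo
  rcases Nat.lt_or_ge i csv.length with h | h
  · rw [dif_pos h]
    have hget : PySem.List.pyGetD csv (i : Int) [] = csv[i] := by
      simp [PySem.List.pyGetD_natCast, List.getD, h]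
    have hdrop : csv.drop i = csv[i] :: csv.drop (i + 1) := List.drop_eq_getElem_cons h
    show (pvKey (PySem.List.pyGetD csv (i : Int) []),
        PySem.List.slice csv (some (i : Int))
          (some ((pvScan csv csv.length (pvKey (PySem.List.pyGetD csv (i : Int) [])) (i + 1) : Nat) : Int))) ::
        pvAltGo csv csv.length (pvScan csv csv.length (pvKey (PySem.List.pyGetD csv (i : Int) [])) (i + 1)) =
      pvBgo (csv.drop i)
    rw [hget]
    set k := pvKey csv[i] with hk
    set t := ((csv.drop (i + 1)).takeWhile (pvSameKey k)).length with ht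
    have htle : t ≤ csv.length - (i + 1) := by
      have h1 := List.Sublist.length_le (List.takeWhile_sublist (l := csv.drop (i + 1)) (pvSameKey k))
      rw [← ht] at h1
      simpa using h1
    have hscan : pvScan csv csv.length k (i + 1) = i + 1 + t := by
      rw [pvScan_eq csv k (i + 1) (by omega), ← ht]
    rw [hscan]
    have hslice : PySem.List.slice csv (some ((i : Nat) : Int)) (some ((i + 1 + t : Nat) : Int)) =
        csv[i] :: (csv.drop (i + 1)).takeWhile (pvSameKey k) := by
      rw [PySem.List.slice_natCast, hdrop]
      have h2 : i + 1 + t - i = t + 1 := by omega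
      rw [h2, List.take_succ_cons]
      rw [ht, pvTakeLen]
    rw [hslice]
    have hdrop2 : csv.drop (i + 1 + t) = (csv.drop (i + 1)).dropWhile (pvSameKey k) := by
      rw [← pvDropLen (pvSameKey k) (csv.drop (i + 1)), ← ht, List.drop_drop]
    rw [pvAltGo_eq csv (i + 1 + t) (by omega), hdrop2, hdrop, pvBgo_cons, ← hk]
  · rw [dif_neg (by omega), List.drop_eq_nil_of_le h, pvBgo_nil]
termination_by csv.length - i
decreasing_by omega

def pvFinalize (st : List (String × List (List String)) × List (List String) × Option String) :
    List (String × List (List String)) :=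
  if st.2.1 ≠ [] then st.1 ++ [(st.2.2.getD "", st.2.1)] else st.1

theorem pvAfold (xs : List (List String)) (acc : List (String × List (List String)))
    (sel : List (List String)) (k : String) (hsel : sel ≠ []) :
    pvFinalize (xs.foldl pvAStep (acc, sel, some k)) =
      acc ++ (k, sel ++ xs.takeWhile (pvSameKey k)) :: pvBgo (xs.dropWhile (pvSameKey k)) := by
  induction xs generalizing acc sel k with
  | nil => simp [pvFinalize, hsel, pvBgo_nil]
  | cons x xs ih =>
    by_cases hk : pvSameKey k x
    · have hkx : pvKey x = k := by simpa [pvSameKey] using hk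
      have hstep : pvAStep (acc, sel, some k) x = (acc, sel ++ [x], some k) := by
        simp [pvAStep, hkx]
      rw [List.foldl_cons, hstep, ih acc (sel ++ [x]) k (by simp),
        List.takeWhile_cons, List.dropWhile_cons, if_pos hk, if_pos hk]
      simp
    · have hkx : pvKey x ≠ k := by simpa [pvSameKey] using hk
      have hstep : pvAStep (acc, sel, some k) x =
          (acc ++ [(k, sel)], [x], some (pvKey x)) := by
        simp [pvAStep, hkx, hsel]
      rw [List.foldl_cons, hstep, ih (acc ++ [(k, sel)]) [x] (pvKey x) (by simp),
        List.takeWhile_cons, List.dropWhile_cons, if_neg hk, if_neg hk]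
      simp [pvBgo_cons]

theorem matchine_types_eq_pvBgo (csv : List (List String)) :
    matchine_types csv = pvBgo csv := by
  cases csv with
  | nil => simp [matchine_types, pvBgo_nil]
  | cons x xs =>
    have hstep : pvAStep ([], [], none) x = ([], [x], some (pvKey x)) := by
      simp [pvAStep]
    have h := pvAfold xs [] [x] (pvKey x) (by simp)
    unfold matchine_types
    rw [List.foldl_cons, hstep]
    unfold pvFinalize at h
    simp only at h ⊢
    rw [h]
    simp [pvBgo_cons]

-- ===== VERDICT (by name: the statement is the Claim_ definition above) =====
theorem matchine_types_spec : Claim_equal_matchine_types := by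
  intro csv _ _
  unfold Spec_matchine_types matchine_types_alt
  rw [matchine_types_eq_pvBgo, pvAltGo_eq csv 0 (by omega), List.drop_zero]
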